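-- pv_equiv track=rewrite | github.com/myrisamitchell/CS0-mmitchell | Assignments/fallingapart/fallingapart.py | sort_sums
-- ===== SOURCE A (Python) =====
-- def sort_sums(integer_list):
--     alice_turn = True
--     alice_sum = 0
--     bob_sum = 0
--     for i in integer_list:
--         #Step 2
--         if alice_turn:
--             alice_sum += i
--             alice_turn = False
--         #Step 3
--         else:
--             bob_sum += i
--             alice_turn = True
--     return alice_sum, bob_sum
-- ===== SOURCE B (Python) =====
-- def sort_sums(integer_list):
--     alice = bob = 0
--     i, n = 0, len(integer_list)
--     while i + 1 < n:
--         alice += integer_list[i]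
--         bob += integer_list[i + 1]
--         i += 2
--     if i < n:
--         alice += integer_list[i]
--     return alice, bob
-- ===== Notes on version B (the rewrite author's own statement) =====
-- stated objective: alternative
-- what changed: Replaces the boolean-toggle single-element loop with a while loop that consumes the list two elements per step (one for Alice, one for Bob), handling a trailing odd element separately; no turn flag is maintained.
import Mathlib
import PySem

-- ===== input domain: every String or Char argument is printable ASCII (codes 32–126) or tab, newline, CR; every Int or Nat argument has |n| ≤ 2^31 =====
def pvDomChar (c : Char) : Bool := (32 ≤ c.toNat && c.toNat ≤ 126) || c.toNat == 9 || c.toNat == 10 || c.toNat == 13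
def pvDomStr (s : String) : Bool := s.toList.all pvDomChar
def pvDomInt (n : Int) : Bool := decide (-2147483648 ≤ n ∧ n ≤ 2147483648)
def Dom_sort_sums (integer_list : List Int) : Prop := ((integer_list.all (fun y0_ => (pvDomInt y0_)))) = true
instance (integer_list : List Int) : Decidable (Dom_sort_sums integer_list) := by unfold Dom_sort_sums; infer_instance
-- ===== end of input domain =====

-- B replaces A's boolean-toggle loop with a loop consuming two elements per step (alternative decomposition, same cost).

-- ===== PORT A =====
-- A: boolean toggle, one element per iteration; state (alice_turn, alice_sum, bob_sum).
def sort_sums (integer_list : List Int) : Int × Int :=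
  let st := integer_list.foldl
    (fun (s : Bool × Int × Int) i =>
      if s.1 then (false, s.2.1 + i, s.2.2) else (true, s.2.1, s.2.2 + i))
    (true, 0, 0)
  (st.2.1, st.2.2)

-- ===== PORT B =====
-- B's while loop advances the index by 2, adding one element to each sum; the
-- trailing odd element (if any) goes to alice.  Ported as the structural
-- two-at-a-time recursion over the list with the two accumulators.
def sortSumsGo : List Int → Int → Int → Int × Int
  | [], a, b => (a, b)
  | [x], a, b => (a + x, b)
  | x :: y :: rest, a, b => sortSumsGo rest (a + x) (b + y)

def sort_sums_alt (integer_list : List Int) : Int × Int :=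
  sortSumsGo integer_list 0 0

-- ===== PRECONDITION & SPEC =====
def Spec_sort_sums (integer_list : List Int) (out : Int × Int) : Prop := out = sort_sums_alt integer_list
instance (integer_list : List Int) (out : Int × Int) : Decidable (Spec_sort_sums integer_list out) := by unfold Spec_sort_sums; infer_instance

-- ===== CLAIM (what is proved, stated in full; the proofs are below) =====
def Claim_equal_sort_sums : Prop := ∀ (integer_list : List Int), Dom_sort_sums integer_list → Spec_sort_sums integer_list (sort_sums integer_list)

-- ===== LEMMAS AND PROOFS =====

-- Prepending one element shifts the roles: the new head goes to the first sum
-- and the two accumulators swap.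
theorem sortSumsGo_cons (l : List Int) : ∀ (x a b : Int),
    sortSumsGo (x :: l) a b = Prod.swap (sortSumsGo l b (a + x)) := by
  induction l with
  | nil => intro x a b; simp [sortSumsGo]
  | cons y r ih =>
    intro x a b
    show sortSumsGo r (a + x) (b + y) = Prod.swap (sortSumsGo (y :: r) b (a + x))
    rw [ih y b (a + x), Prod.swap_swap]

theorem sort_sums_foldl (l : List Int) : ∀ (a b : Int),
    ((l.foldl (fun (s : Bool × Int × Int) i =>
        if s.1 then (false, s.2.1 + i, s.2.2) else (true, s.2.1, s.2.2 + i))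
      (true, a, b)).2 = sortSumsGo l a b)
    ∧
    ((l.foldl (fun (s : Bool × Int × Int) i =>
        if s.1 then (false, s.2.1 + i, s.2.2) else (true, s.2.1, s.2.2 + i))
      (false, a, b)).2 = Prod.swap (sortSumsGo l b a)) := by
  induction l with
  | nil => intro a b; simp [sortSumsGo]
  | cons x r ih =>
    intro a b
    constructor
    · show (r.foldl _ (false, a + x, b)).2 = sortSumsGo (x :: r) a b
      rw [(ih (a + x) b).2, sortSumsGo_cons]
    · show (r.foldl _ (true, a, b + x)).2 = Prod.swap (sortSumsGo (x :: r) b a)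
      rw [(ih a (b + x)).1, sortSumsGo_cons r x b a, Prod.swap_swap]

-- ===== VERDICT (by name: the statement is the Claim_ definition above) =====
theorem sort_sums_spec : Claim_equal_sort_sums := by
  intro l _
  unfold Spec_sort_sums sort_sums sort_sums_alt
  simpa using (sort_sums_foldl l 0 0).1
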